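-- pv_equiv track=rewrite | github.com/EdwardKYC/code-space | onlinejudge/bruteforce_single_process.py | gen_from_mask
-- ===== SOURCE A (Python) =====
-- import argparse, base64, itertools, string, time
--
-- def gen_from_mask(mask_list, positions, charset):
--     if not positions:
--         # join mask_list (should have no None)
--         yield ''.join(ch for ch in mask_list)
--         return
--     for prod in itertools.product(charset, repeat=len(positions)):
--         tmp = list(mask_list)
--         for p,ch in zip(positions, prod):
--             tmp[p] = ch
--         yield ''.join(tmp)
-- ===== SOURCE B (Python) =====
-- def gen_from_mask(mask_list, positions, charset):
--     # DFS: recursively fill masked positions in a single shared buffer,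
--     # charset iterated in order with positions[0] outermost.
--     buf = list(mask_list)
--     n = len(positions)
--     def fill(i):
--         if i == n:
--             yield ''.join(buf)
--             return
--         for ch in charset:
--             buf[positions[i]] = ch
--             yield from fill(i + 1)
--     yield from fill(0)
-- ===== Notes on version B (the rewrite author's own statement) =====
-- stated objective: alternative
-- what changed: Replaces itertools.product plus a per-tuple copy-and-assign pass with a recursive depth-first fill of one shared buffer (one assignment per tree edge instead of rebuilding each string's assignment list).
import Mathlib
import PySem

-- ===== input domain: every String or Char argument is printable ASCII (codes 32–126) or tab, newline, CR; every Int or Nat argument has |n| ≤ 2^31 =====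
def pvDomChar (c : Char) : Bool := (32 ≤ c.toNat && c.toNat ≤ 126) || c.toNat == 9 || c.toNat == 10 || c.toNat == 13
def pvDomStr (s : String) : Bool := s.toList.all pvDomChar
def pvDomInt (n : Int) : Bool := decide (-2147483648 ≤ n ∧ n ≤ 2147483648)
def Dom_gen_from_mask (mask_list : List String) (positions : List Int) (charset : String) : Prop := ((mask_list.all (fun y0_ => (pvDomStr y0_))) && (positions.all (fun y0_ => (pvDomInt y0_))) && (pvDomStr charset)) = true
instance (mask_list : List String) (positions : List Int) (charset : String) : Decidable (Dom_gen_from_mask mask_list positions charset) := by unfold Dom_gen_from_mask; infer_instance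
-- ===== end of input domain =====

-- B replaces the itertools.product + per-tuple copy/assign pass with a recursive
-- depth-first fill of one shared buffer (alternative decomposition, same cost).
-- The Python versions are generators; the ports return the list of yielded strings.

-- ===== PORT A =====
-- itertools.product(charset, repeat=n): leftmost factor outermost
def pvProductRepeat (cs : List Char) : Nat → List (List Char)
  | 0 => [[]]
  | n + 1 => cs.flatMap (fun c => (pvProductRepeat cs n).map (fun rest => c :: rest))

def gen_from_mask (mask_list : List String) (positions : List Int) (charset : String) : List String :=
  if positions = [] then
    [PySem.Str.join "" mask_list]            -- ''.join(ch for ch in mask_list)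
  else
    (pvProductRepeat charset.toList positions.length).map (fun prod =>
      -- tmp = list(mask_list); for p,ch in zip(positions, prod): tmp[p] = ch
      -- tmp[p] = ch raises IndexError when p is out of range: pySetD is exact only under Pre_
      PySem.Str.join ""
        ((positions.zip prod).foldl
          (fun tmp pc => PySem.List.pySetD tmp pc.1 (String.mk [pc.2])) mask_list))

-- ===== PORT B =====
-- fill(i): for ch in charset: buf[positions[i]] = ch; recurse — recursion on the remaining positions
def pvFill (cs : List Char) : List Int → List String → List String
  | [], buf => [PySem.Str.join "" buf]
  | p :: rest, buf =>
      cs.flatMap (fun ch => pvFill cs rest (PySem.List.pySetD buf p (String.mk [ch])))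

def gen_from_mask_alt (mask_list : List String) (positions : List Int) (charset : String) : List String :=
  pvFill charset.toList positions mask_list

-- ===== PRECONDITION & SPEC =====
-- Pre_ excludes exactly the inputs where tmp[p] = ch raises IndexError in Python
-- (some position out of range, reached only when positions and charset are both nonempty).
def Pre_gen_from_mask (mask_list : List String) (positions : List Int) (charset : String) : Prop :=
  positions = [] ∨ charset = "" ∨
    ∀ p ∈ positions, -(mask_list.length : Int) ≤ p ∧ p < mask_list.length
instance (mask_list : List String) (positions : List Int) (charset : String) : Decidable (Pre_gen_from_mask mask_list positions charset) := by unfold Pre_gen_from_mask; infer_instance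

def pvWitness_gen_from_mask : List String × List Int × String := (["a", "?", "c"], [1, -3], "xy")

def Spec_gen_from_mask (mask_list : List String) (positions : List Int) (charset : String) (out : List String) : Prop := out = gen_from_mask_alt mask_list positions charset
instance (mask_list : List String) (positions : List Int) (charset : String) (out : List String) : Decidable (Spec_gen_from_mask mask_list positions charset out) := by unfold Spec_gen_from_mask; infer_instance

-- ===== CLAIM (what is proved, stated in full; the proofs are below) =====
def Claim_equal_gen_from_mask : Prop := ∀ (mask_list : List String) (positions : List Int) (charset : String), Dom_gen_from_mask mask_list positions charset → Pre_gen_from_mask mask_list positions charset → Spec_gen_from_mask mask_list positions charset (gen_from_mask mask_list positions charset)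

-- ===== LEMMAS AND PROOFS =====

-- The DFS equals "map the assignment pass over the full product", for every buffer.
theorem pvFill_eq_map_product (cs : List Char) (ps : List Int) (buf : List String) :
    pvFill cs ps buf =
      (pvProductRepeat cs ps.length).map (fun prod =>
        PySem.Str.join ""
          ((ps.zip prod).foldl
            (fun tmp pc => PySem.List.pySetD tmp pc.1 (String.mk [pc.2])) buf)) := by
  induction ps generalizing buf with
  | nil => simp [pvFill, pvProductRepeat]
  | cons p rest ih =>
      simp only [pvFill, List.length_cons, pvProductRepeat, List.map_flatMap,
        List.map_map]
      refine List.flatMap_congr ?_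
      intro c _
      rw [ih]
      rfl

theorem gen_from_mask_spec : Claim_equal_gen_from_mask := by
  intro mask_list positions charset _ _
  unfold Spec_gen_from_mask gen_from_mask gen_from_mask_alt
  rw [pvFill_eq_map_product]
  split
  · rename_i h
    subst h
    simp [pvProductRepeat]
  · rfl
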